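-- pv_equiv track=rewrite | github.com/Kirom0/karchivator | Coder_tests.py | byte_to_bin
-- ===== SOURCE A (Python) =====
-- def byte_to_bin(byte):
--     res = []
--     while byte > 0:
--         res.append(byte % 2 == 1)
--         byte //= 2
--     while len(res) < 8:
--         res.append(False)
--     return res[::-1]
-- ===== SOURCE B (Python) =====
-- def byte_to_bin(byte):
--     if byte <= 0:
--         return [False] * 8
--     length = max(8, byte.bit_length())
--     return [(byte >> i) & 1 == 1 for i in range(length - 1, -1, -1)]
-- ===== Notes on version B (the rewrite author's own statement) =====
-- stated objective: simpler
-- what changed: Computes the output length up front (max(8, bit_length)) and emits bits directly in big-endian order via one comprehension, instead of accumulating little-endian bits in a loop, padding with a second loop, and reversing.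
import Mathlib
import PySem

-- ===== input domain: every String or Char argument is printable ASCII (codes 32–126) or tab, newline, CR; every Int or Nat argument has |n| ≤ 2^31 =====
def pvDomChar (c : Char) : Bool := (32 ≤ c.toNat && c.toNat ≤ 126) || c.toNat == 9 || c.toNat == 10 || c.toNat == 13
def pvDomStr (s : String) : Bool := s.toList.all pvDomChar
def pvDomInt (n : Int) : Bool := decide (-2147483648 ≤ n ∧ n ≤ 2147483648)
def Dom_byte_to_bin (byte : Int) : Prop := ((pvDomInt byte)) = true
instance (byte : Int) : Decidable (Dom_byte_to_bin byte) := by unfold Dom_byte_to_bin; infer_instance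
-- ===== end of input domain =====

-- B computes the output length up front (max 8 (bit_length byte)) and emits the bits big-endian
-- directly in one comprehension, instead of A's little-endian accumulation loop + pad loop + reverse.

-- ===== PORT A =====
-- while byte > 0: res.append(byte % 2 == 1); byte //= 2   (little-endian bit list)
def pvBitsLE (byte : Int) : List Bool :=
  if _h : byte > 0 then
    (PySem.Int.mod byte 2 == 1) :: pvBitsLE (PySem.Int.floordiv byte 2)
  else []
termination_by byte.toNat
decreasing_by
  rw [PySem.Int.floordiv_eq_ediv_of_pos (by omega : (0:Int) < 2)]
  omega

-- while len(res) < 8: res.append(False)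
def pvPad8 (res : List Bool) : List Bool :=
  if res.length < 8 then pvPad8 (res ++ [false]) else res
termination_by 8 - res.length

-- res[::-1] is List.reverse (PySem.List.slice?_none_none_neg_one)
def byte_to_bin (byte : Int) : List Bool :=
  (pvPad8 (pvBitsLE byte)).reverse

-- ===== PORT B =====
-- Python's 'b >> k' (k ≥ 0) is core Lean's Nat-indexed '>>>' (see PYSEM.md SHIFTS)
def pvShift (b : Int) (k : Nat) : Int := b >>> k

def byte_to_bin_alt (byte : Int) : List Bool :=
  if byte ≤ 0 then List.replicate 8 false
  else
    let length : Int := max 8 ((PySem.Int.bitLength byte : Nat) : Int)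
    -- every i produced by range(length-1, -1, -1) is ≥ 0, so 'byte >> i' is 'byte >>> i.toNat'
    (PySem.List.pyRange (length - 1) (-1) (-1)).map
      (fun i => PySem.Int.band (pvShift byte i.toNat) 1 == 1)

-- ===== PRECONDITION & SPEC =====
def Spec_byte_to_bin (byte : Int) (out : List Bool) : Prop := out = byte_to_bin_alt byte
instance (byte : Int) (out : List Bool) : Decidable (Spec_byte_to_bin byte out) := by unfold Spec_byte_to_bin; infer_instance

-- ===== CLAIM (what is proved, stated in full; the proofs are below) =====
def Claim_equal_byte_to_bin : Prop := ∀ (byte : Int), Dom_byte_to_bin byte → Spec_byte_to_bin byte (byte_to_bin byte)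

-- ===== LEMMAS AND PROOFS =====

theorem pvBitsLE_nil (b : Int) (hb : b ≤ 0) : pvBitsLE b = [] := by
  rw [pvBitsLE]; simp [show ¬ b > 0 by omega]

theorem pvBitsLE_cons (b : Int) (hb : 0 < b) :
    pvBitsLE b = (PySem.Int.mod b 2 == 1) :: pvBitsLE (PySem.Int.floordiv b 2) := by
  rw [pvBitsLE]; simp [hb]

theorem pvPad8_eq (res : List Bool) : pvPad8 res = res ++ List.replicate (8 - res.length) false := by
  rw [pvPad8]
  split
  · rw [pvPad8_eq (res ++ [false])]
    simp only [List.append_assoc, List.length_append, List.length_singleton]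
    congr 1
    have h8 : 8 - res.length = (8 - (res.length + 1)) + 1 := by omega
    rw [h8, List.replicate_succ]
    rfl
  · have : 8 - res.length = 0 := by omega
    simp [this]
termination_by 8 - res.length

theorem pvBitsLE_length (b : Int) (hb : 0 ≤ b) :
    (pvBitsLE b).length = PySem.Int.bitLength b := by
  by_cases h : 0 < b
  · rw [pvBitsLE_cons b h, PySem.Int.bitLength_of_pos h]
    have hfd : PySem.Int.floordiv b 2 = b / 2 :=
      PySem.Int.floordiv_eq_ediv_of_pos (by omega : (0:Int) < 2)
    have ih := pvBitsLE_length (PySem.Int.floordiv b 2) (by rw [hfd]; omega)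
    simp only [List.length_cons]
    rw [hfd] at ih ⊢
    omega
  · have hb0 : b = 0 := by omega
    subst hb0
    rw [pvBitsLE_nil 0 (by omega)]
    simp [PySem.Int.bitLength_zero]
termination_by b.toNat
decreasing_by
  rw [PySem.Int.floordiv_eq_ediv_of_pos (by omega : (0:Int) < 2)]
  omega

theorem pv_band_shift (b : Int) (k : Nat) :
    (PySem.Int.band (pvShift b k) 1 == 1) = decide (b / 2 ^ k % 2 = 1) := by
  rw [pvShift, PySem.Int.band_one, PySem.Int.mod_eq_emod_of_pos (by omega : (0:Int) < 2),
    Int.shiftRight_eq_div_pow]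
  have hc : ((2 ^ k : Nat) : Int) = (2:Int) ^ k := by push_cast; ring
  rw [hc]
  by_cases h : b / 2 ^ k % 2 = 1 <;> simp [h]

theorem pvBitsLE_get (i : Nat) : ∀ (b : Int), 0 < b → i < PySem.Int.bitLength b →
    (pvBitsLE b)[i]? = some (decide (b / 2^i % 2 = 1)) := by
  induction i with
  | zero =>
    intro b hb _
    rw [pvBitsLE_cons b hb]
    simp only [List.getElem?_cons_zero, pow_zero, Int.ediv_one,
      PySem.Int.mod_eq_emod_of_pos (by omega : (0:Int) < 2)]
    by_cases h : b % 2 = 1 <;> simp [h]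
  | succ i ih =>
    intro b hb hi
    rw [pvBitsLE_cons b hb]
    simp only [List.getElem?_cons_succ]
    have hfd : PySem.Int.floordiv b 2 = b / 2 :=
      PySem.Int.floordiv_eq_ediv_of_pos (by omega : (0:Int) < 2)
    rw [PySem.Int.bitLength_of_pos hb] at hi
    have hi' : i < PySem.Int.bitLength (PySem.Int.floordiv b 2) := by omega
    have hpos : 0 < PySem.Int.floordiv b 2 := by
      rw [hfd]
      by_contra hc
      have h0 : b / 2 = 0 := by omega
      rw [hfd, h0] at hi'
      simp [PySem.Int.bitLength_zero] at hi'
    rw [ih _ hpos hi', hfd]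
    congr 2
    rw [Int.ediv_ediv_eq_ediv_mul, pow_succ, mul_comm]
    omega

theorem byte_to_bin_spec : Claim_equal_byte_to_bin := by
  intro byte _
  unfold Spec_byte_to_bin byte_to_bin byte_to_bin_alt
  by_cases hb : byte ≤ 0
  · rw [if_pos hb, pvBitsLE_nil byte hb, pvPad8_eq]
    simp
  · rw [if_neg hb]
    push_neg at hb
    set L : Nat := PySem.Int.bitLength byte with hL
    have hrev : pvPad8 (pvBitsLE byte) =
        ((PySem.List.pyRange (max 8 ((L : Nat) : Int) - 1) (-1) (-1)).map
          (fun i => PySem.Int.band (pvShift byte i.toNat) 1 == 1)).reverse := by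
      rw [PySem.List.pyRange_neg_one, List.map_map]
      set M : Nat := (max 8 ((L : Nat) : Int) - 1 - -1).toNat with hMdef
      have hM : M = max 8 L := by omega
      have hLen : (pvBitsLE byte).length = L := pvBitsLE_length byte (by omega)
      apply List.ext_getElem?
      intro n
      by_cases hn : n < M
      · rw [pvPad8_eq]
        rw [List.getElem?_reverse (by simpa using hn)]
        simp only [List.length_map, List.length_range, List.getElem?_map]
        rw [List.getElem?_range (by omega)]
        simp only [Option.map_some, Function.comp_apply]
        have hidx : max (8:Int) ((L : Nat) : Int) - 1 - ((M - 1 - n : Nat) : Int) = (n : Int) := by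
          omega
        rw [hidx]
        simp only [Int.toNat_natCast]
        rw [pv_band_shift byte n]
        by_cases hnL : n < L
        · rw [List.getElem?_append_left (by omega)]
          exact pvBitsLE_get n byte hb (by rw [← hL]; omega)
        · rw [List.getElem?_append_right (by omega)]
          rw [List.getElem?_replicate]
          rw [if_pos (by omega)]
          have h1' : byte.natAbs < 2 ^ L := PySem.Int.lt_two_pow_bitLength byte
          have h2' : (2:Nat) ^ L ≤ 2 ^ n := Nat.pow_le_pow_right (by omega) (by omega)
          have hc : (((2:Nat) ^ n : Nat) : Int) = (2:Int) ^ n := by push_cast; ring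
          have hlt : byte < (2:Int) ^ n := by omega
          rw [Int.ediv_eq_zero_of_lt (by omega) hlt]
          simp
      · rw [pvPad8_eq]
        rw [List.getElem?_eq_none
          (by simp only [List.length_append, List.length_replicate, hLen]; omega)]
        symm
        apply List.getElem?_eq_none
        simp only [List.length_reverse, List.length_map, List.length_range]
        omega
    rw [hrev, List.reverse_reverse]
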